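-- pv_equiv track=rewrite | github.com/gamzesirin/IMDB-sentiment-analysis-project | src/preprocessor.py | stem_text
-- ===== SOURCE A (Python) =====
-- def stem_text(text: str) -> str:
--     """
--     Metni stem eder (basitleştirilmiş versiyon).
--
--     Args:
--         text: İşlenecek metin
--
--     Returns:
--         str: Stem edilmiş metin
--     """
--     # Basit stemming
--     words = text.split()
--     stemmed = []
--     for word in words:
--         # Daha agresif suffix kaldırma
--         if word.endswith('tion') and len(word) > 6:
--             word = word[:-4]
--         elif word.endswith('ness') and len(word) > 6:
--             word = word[:-4]
--         elif word.endswith('ing') and len(word) > 5: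
--             word = word[:-3]
--         elif word.endswith('ed') and len(word) > 4:
--             word = word[:-2]
--         elif word.endswith('s') and len(word) > 3 and not word.endswith('ss'):
--             word = word[:-1]
--         stemmed.append(word)
--     return ' '.join(stemmed)
-- ===== SOURCE B (Python) =====
-- # Reverse-suffix trie: walk each word back-to-front through a trie of reversed
-- # suffixes, remembering the deepest rule whose length bound passes; 'ss' is a
-- # zero-cut rule that blocks plural stripping.
-- RULES = [('s', 1, 3), ('ss', 0, -1), ('ed', 2, 4), ('ing', 3, 5), ('tion', 4, 6), ('ness', 4, 6)]
--
-- def _build_trie():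
--     root = [None, {}]
--     for suf, cut, minlen in RULES:
--         node = root
--         for ch in reversed(suf):
--             node = node[1].setdefault(ch, [None, {}])
--         node[0] = (cut, minlen)
--     return root
--
-- _TRIE = _build_trie()
--
-- def stem_text(text: str) -> str:
--     out = []
--     for word in text.split():
--         node, best = _TRIE, 0
--         for ch in reversed(word):
--             node = node[1].get(ch)
--             if node is None:
--                 break
--             rule = node[0]
--             if rule is not None and len(word) > rule[1]:
--                 best = rule[0]
--         out.append(word[:-best] if best else word)
--     return ' '.join(out)
-- ===== Notes on version B (the rewrite author's own statement) =====
-- stated objective: alternative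
-- what changed: Replaces A's per-word if/elif endswith chain by a reverse-suffix trie: each word is walked back-to-front through a trie of reversed suffixes, keeping the deepest rule whose length bound passes (with 'ss' as a zero-cut blocking rule), so no endswith scans are performed.
import Mathlib
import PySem

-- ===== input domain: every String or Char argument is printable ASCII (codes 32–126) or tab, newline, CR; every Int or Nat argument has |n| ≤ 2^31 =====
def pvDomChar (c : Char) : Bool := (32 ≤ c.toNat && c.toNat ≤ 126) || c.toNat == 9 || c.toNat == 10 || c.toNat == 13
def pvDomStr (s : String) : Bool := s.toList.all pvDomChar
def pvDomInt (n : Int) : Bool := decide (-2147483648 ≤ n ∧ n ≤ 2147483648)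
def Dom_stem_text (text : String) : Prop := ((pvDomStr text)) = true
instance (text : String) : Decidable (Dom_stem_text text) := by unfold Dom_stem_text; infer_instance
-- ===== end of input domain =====

-- B replaces A's if/elif endswith chain by a reverse-suffix trie walked back-to-front,
-- keeping the deepest rule whose length bound passes (objective: alternative; same cost).

-- ===== PORT A =====
-- per-word stemming: A's if/elif chain, on the word's character list
def pvStemCharsA (l : List Char) : List Char :=
  if PySem.Chars.endswith l ['t','i','o','n'] && PySem.Chars.len l > 6 then
    PySem.Chars.slice l none (some (-4))
  else if PySem.Chars.endswith l ['n','e','s','s'] && PySem.Chars.len l > 6 then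
    PySem.Chars.slice l none (some (-4))
  else if PySem.Chars.endswith l ['i','n','g'] && PySem.Chars.len l > 5 then
    PySem.Chars.slice l none (some (-3))
  else if PySem.Chars.endswith l ['e','d'] && PySem.Chars.len l > 4 then
    PySem.Chars.slice l none (some (-2))
  else if PySem.Chars.endswith l ['s'] && PySem.Chars.len l > 3 &&
      !(PySem.Chars.endswith l ['s','s']) then
    PySem.Chars.slice l none (some (-1))
  else l

def stem_text (text : String) : String :=
  let words := PySem.Str.split₀ text
  let stemmed := words.foldl (fun acc word => acc ++ [String.ofList (pvStemCharsA word.toList)]) []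
  PySem.Str.join " " stemmed

-- ===== PORT B =====
-- the trie Source B builds from its rule table, rendered as a finite node type with
-- child and rule tables (paths: s, s-s, d-e, g-n-i, n-o-i-t, s-s-e-n)
inductive PvNode : Type
  | root | d | de | g | gn | gni | n | no | noi | noit | s | ss | sse | ssen
  deriving DecidableEq, Repr

def pvChild : PvNode → Char → Option PvNode
  | .root, c => if c = 'd' then some .d else if c = 'g' then some .g else
      if c = 'n' then some .n else if c = 's' then some .s else none
  | .d, c => if c = 'e' then some .de else none
  | .g, c => if c = 'n' then some .gn else none
  | .gn, c => if c = 'i' then some .gni else none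
  | .n, c => if c = 'o' then some .no else none
  | .no, c => if c = 'i' then some .noi else none
  | .noi, c => if c = 't' then some .noit else none
  | .s, c => if c = 's' then some .ss else none
  | .ss, c => if c = 'e' then some .sse else none
  | .sse, c => if c = 'n' then some .ssen else none
  | .de, _ => none
  | .gni, _ => none
  | .noit, _ => none
  | .ssen, _ => none

def pvRule : PvNode → Option (Int × Int)
  | .s => some (1, 3)
  | .ss => some (0, -1)
  | .de => some (2, 4)
  | .gni => some (3, 5)
  | .noit => some (4, 6)
  | .ssen => some (4, 6)
  | _ => none

-- Source B's inner loop: walk the reversed word, remember the deepest passing rule's cut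
def pvWalk (wl : Int) : PvNode → Int → List Char → Int
  | _, best, [] => best
  | node, best, c :: cs =>
    match pvChild node c with
    | none => best
    | some n' =>
      match pvRule n' with
      | some (cut, minlen) => pvWalk wl n' (if wl > minlen then cut else best) cs
      | none => pvWalk wl n' best cs

def pvStemCharsB (l : List Char) : List Char :=
  let best := pvWalk (l.length : Int) .root 0 l.reverse
  if best ≠ 0 then PySem.Chars.slice l none (some (-best)) else l

def stem_text_alt (text : String) : String :=
  PySem.Str.join " " ((PySem.Str.split₀ text).map (fun w => String.ofList (pvStemCharsB w.toList)))

-- ===== PRECONDITION & SPEC =====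
def Spec_stem_text (text : String) (out : String) : Prop := out = stem_text_alt text
instance (text : String) (out : String) : Decidable (Spec_stem_text text out) := by unfold Spec_stem_text; infer_instance

-- ===== CLAIM =====
def Claim_equal_stem_text : Prop := ∀ (text : String), Dom_stem_text text → Spec_stem_text text (stem_text text)

-- ===== LEMMAS AND PROOFS =====
lemma pvEndsRev (r p : List Char) : PySem.Chars.endswith r.reverse p = p.reverse.isPrefixOf r := by
  simp [PySem.Chars.endswith, List.isSuffixOf]

set_option maxHeartbeats 1000000 in
lemma pvWalk_leaf (wl best : Int) (cs : List Char) (node : PvNode)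
    (h : node = .de ∨ node = .gni ∨ node = .noit ∨ node = .ssen) :
    pvWalk wl node best cs = best := by
  rcases h with h | h | h | h <;> subst h <;> cases cs <;> simp [pvWalk, pvChild]

lemma pvWalk_de (wl best : Int) (cs : List Char) : pvWalk wl .de best cs = best :=
  pvWalk_leaf wl best cs _ (.inl rfl)
lemma pvWalk_gni (wl best : Int) (cs : List Char) : pvWalk wl .gni best cs = best :=
  pvWalk_leaf wl best cs _ (.inr (.inl rfl))
lemma pvWalk_noit (wl best : Int) (cs : List Char) : pvWalk wl .noit best cs = best :=
  pvWalk_leaf wl best cs _ (.inr (.inr (.inl rfl)))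
lemma pvWalk_ssen (wl best : Int) (cs : List Char) : pvWalk wl .ssen best cs = best :=
  pvWalk_leaf wl best cs _ (.inr (.inr (.inr rfl)))

lemma pvStemChars_eq (r : List Char) : pvStemCharsA r.reverse = pvStemCharsB r.reverse := by
  simp only [pvStemCharsA, pvStemCharsB, pvEndsRev, List.reverse_reverse, PySem.Chars.len,
    List.length_reverse]
  cases r with
  | nil => simp [List.isPrefixOf, pvWalk]
  | cons c1 r1 =>
    by_cases h1 : c1 = 'd'
    · subst h1
      rcases r1 with _ | ⟨c2, r2⟩
      · simp only [List.reverse_cons, List.reverse_nil, List.nil_append, List.cons_append, List.isPrefixOf, List.length_cons, Char.reduceBEq, beq_self_eq_true, Bool.and_false, Bool.false_and, Bool.true_and, Bool.and_true, Bool.not_true, Bool.not_false, Bool.false_eq_true, not_true, if_false, if_true, decide_eq_true_eq, pvWalk_de, pvWalk_gni, pvWalk_noit, pvWalk_ssen, pvWalk, pvChild, pvRule, Char.reduceEq, reduceIte, reduceCtorEq, ne_eq]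
        try split_ifs <;> first | rfl | omega | (exfalso; omega)
      · by_cases h2 : c2 = 'e'
        · subst h2
          simp only [List.reverse_cons, List.reverse_nil, List.nil_append, List.cons_append, List.isPrefixOf, List.length_cons, Char.reduceBEq, beq_self_eq_true, Bool.and_false, Bool.false_and, Bool.true_and, Bool.and_true, Bool.not_true, Bool.not_false, Bool.false_eq_true, not_true, if_false, if_true, decide_eq_true_eq, pvWalk_de, pvWalk_gni, pvWalk_noit, pvWalk_ssen, pvWalk, pvChild, pvRule, Char.reduceEq, reduceIte, reduceCtorEq, ne_eq]
          try split_ifs <;> first | rfl | omega | (exfalso; omega)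
        · have hb0 : (('e' == c2) = false) := by simp [Ne.symm h2]
          simp only [h2, hb0, List.reverse_cons, List.reverse_nil, List.nil_append, List.cons_append, List.isPrefixOf, List.length_cons, Char.reduceBEq, beq_self_eq_true, Bool.and_false, Bool.false_and, Bool.true_and, Bool.and_true, Bool.not_true, Bool.not_false, Bool.false_eq_true, not_true, if_false, if_true, decide_eq_true_eq, pvWalk_de, pvWalk_gni, pvWalk_noit, pvWalk_ssen, pvWalk, pvChild, pvRule, Char.reduceEq, reduceIte, reduceCtorEq, ne_eq]
          try split_ifs <;> first | rfl | omega | (exfalso; omega)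
    · by_cases h1g : c1 = 'g'
      · subst h1g
        rcases r1 with _ | ⟨c2, r2⟩
        · simp only [List.reverse_cons, List.reverse_nil, List.nil_append, List.cons_append, List.isPrefixOf, List.length_cons, Char.reduceBEq, beq_self_eq_true, Bool.and_false, Bool.false_and, Bool.true_and, Bool.and_true, Bool.not_true, Bool.not_false, Bool.false_eq_true, not_true, if_false, if_true, decide_eq_true_eq, pvWalk_de, pvWalk_gni, pvWalk_noit, pvWalk_ssen, pvWalk, pvChild, pvRule, Char.reduceEq, reduceIte, reduceCtorEq, ne_eq]
          try split_ifs <;> first | rfl | omega | (exfalso; omega)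
        · by_cases h2 : c2 = 'n'
          · subst h2
            rcases r2 with _ | ⟨c3, r3⟩
            · simp only [List.reverse_cons, List.reverse_nil, List.nil_append, List.cons_append, List.isPrefixOf, List.length_cons, Char.reduceBEq, beq_self_eq_true, Bool.and_false, Bool.false_and, Bool.true_and, Bool.and_true, Bool.not_true, Bool.not_false, Bool.false_eq_true, not_true, if_false, if_true, decide_eq_true_eq, pvWalk_de, pvWalk_gni, pvWalk_noit, pvWalk_ssen, pvWalk, pvChild, pvRule, Char.reduceEq, reduceIte, reduceCtorEq, ne_eq]
              try split_ifs <;> first | rfl | omega | (exfalso; omega)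
            · by_cases h3 : c3 = 'i'
              · subst h3
                simp only [List.reverse_cons, List.reverse_nil, List.nil_append, List.cons_append, List.isPrefixOf, List.length_cons, Char.reduceBEq, beq_self_eq_true, Bool.and_false, Bool.false_and, Bool.true_and, Bool.and_true, Bool.not_true, Bool.not_false, Bool.false_eq_true, not_true, if_false, if_true, decide_eq_true_eq, pvWalk_de, pvWalk_gni, pvWalk_noit, pvWalk_ssen, pvWalk, pvChild, pvRule, Char.reduceEq, reduceIte, reduceCtorEq, ne_eq]
                try split_ifs <;> first | rfl | omega | (exfalso; omega)
              · have hb0 : (('i' == c3) = false) := by simp [Ne.symm h3]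
                simp only [h3, hb0, List.reverse_cons, List.reverse_nil, List.nil_append, List.cons_append, List.isPrefixOf, List.length_cons, Char.reduceBEq, beq_self_eq_true, Bool.and_false, Bool.false_and, Bool.true_and, Bool.and_true, Bool.not_true, Bool.not_false, Bool.false_eq_true, not_true, if_false, if_true, decide_eq_true_eq, pvWalk_de, pvWalk_gni, pvWalk_noit, pvWalk_ssen, pvWalk, pvChild, pvRule, Char.reduceEq, reduceIte, reduceCtorEq, ne_eq]
                try split_ifs <;> first | rfl | omega | (exfalso; omega)
          · have hb0 : (('n' == c2) = false) := by simp [Ne.symm h2]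
            simp only [h2, hb0, List.reverse_cons, List.reverse_nil, List.nil_append, List.cons_append, List.isPrefixOf, List.length_cons, Char.reduceBEq, beq_self_eq_true, Bool.and_false, Bool.false_and, Bool.true_and, Bool.and_true, Bool.not_true, Bool.not_false, Bool.false_eq_true, not_true, if_false, if_true, decide_eq_true_eq, pvWalk_de, pvWalk_gni, pvWalk_noit, pvWalk_ssen, pvWalk, pvChild, pvRule, Char.reduceEq, reduceIte, reduceCtorEq, ne_eq]
            try split_ifs <;> first | rfl | omega | (exfalso; omega)
      · by_cases h1n : c1 = 'n'
        · subst h1n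
          rcases r1 with _ | ⟨c2, r2⟩
          · simp only [List.reverse_cons, List.reverse_nil, List.nil_append, List.cons_append, List.isPrefixOf, List.length_cons, Char.reduceBEq, beq_self_eq_true, Bool.and_false, Bool.false_and, Bool.true_and, Bool.and_true, Bool.not_true, Bool.not_false, Bool.false_eq_true, not_true, if_false, if_true, decide_eq_true_eq, pvWalk_de, pvWalk_gni, pvWalk_noit, pvWalk_ssen, pvWalk, pvChild, pvRule, Char.reduceEq, reduceIte, reduceCtorEq, ne_eq]
            try split_ifs <;> first | rfl | omega | (exfalso; omega)
          · by_cases h2 : c2 = 'o'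
            · subst h2
              rcases r2 with _ | ⟨c3, r3⟩
              · simp only [List.reverse_cons, List.reverse_nil, List.nil_append, List.cons_append, List.isPrefixOf, List.length_cons, Char.reduceBEq, beq_self_eq_true, Bool.and_false, Bool.false_and, Bool.true_and, Bool.and_true, Bool.not_true, Bool.not_false, Bool.false_eq_true, not_true, if_false, if_true, decide_eq_true_eq, pvWalk_de, pvWalk_gni, pvWalk_noit, pvWalk_ssen, pvWalk, pvChild, pvRule, Char.reduceEq, reduceIte, reduceCtorEq, ne_eq]
                try split_ifs <;> first | rfl | omega | (exfalso; omega)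
              · by_cases h3 : c3 = 'i'
                · subst h3
                  rcases r3 with _ | ⟨c4, r4⟩
                  · simp only [List.reverse_cons, List.reverse_nil, List.nil_append, List.cons_append, List.isPrefixOf, List.length_cons, Char.reduceBEq, beq_self_eq_true, Bool.and_false, Bool.false_and, Bool.true_and, Bool.and_true, Bool.not_true, Bool.not_false, Bool.false_eq_true, not_true, if_false, if_true, decide_eq_true_eq, pvWalk_de, pvWalk_gni, pvWalk_noit, pvWalk_ssen, pvWalk, pvChild, pvRule, Char.reduceEq, reduceIte, reduceCtorEq, ne_eq]
                    try split_ifs <;> first | rfl | omega | (exfalso; omega)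
                  · by_cases h4 : c4 = 't'
                    · subst h4
                      simp only [List.reverse_cons, List.reverse_nil, List.nil_append, List.cons_append, List.isPrefixOf, List.length_cons, Char.reduceBEq, beq_self_eq_true, Bool.and_false, Bool.false_and, Bool.true_and, Bool.and_true, Bool.not_true, Bool.not_false, Bool.false_eq_true, not_true, if_false, if_true, decide_eq_true_eq, pvWalk_de, pvWalk_gni, pvWalk_noit, pvWalk_ssen, pvWalk, pvChild, pvRule, Char.reduceEq, reduceIte, reduceCtorEq, ne_eq]
                      try split_ifs <;> first | rfl | omega | (exfalso; omega)
                    · have hb0 : (('t' == c4) = false) := by simp [Ne.symm h4]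
                      simp only [h4, hb0, List.reverse_cons, List.reverse_nil, List.nil_append, List.cons_append, List.isPrefixOf, List.length_cons, Char.reduceBEq, beq_self_eq_true, Bool.and_false, Bool.false_and, Bool.true_and, Bool.and_true, Bool.not_true, Bool.not_false, Bool.false_eq_true, not_true, if_false, if_true, decide_eq_true_eq, pvWalk_de, pvWalk_gni, pvWalk_noit, pvWalk_ssen, pvWalk, pvChild, pvRule, Char.reduceEq, reduceIte, reduceCtorEq, ne_eq]
                      try split_ifs <;> first | rfl | omega | (exfalso; omega)
                · have hb0 : (('i' == c3) = false) := by simp [Ne.symm h3]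
                  simp only [h3, hb0, List.reverse_cons, List.reverse_nil, List.nil_append, List.cons_append, List.isPrefixOf, List.length_cons, Char.reduceBEq, beq_self_eq_true, Bool.and_false, Bool.false_and, Bool.true_and, Bool.and_true, Bool.not_true, Bool.not_false, Bool.false_eq_true, not_true, if_false, if_true, decide_eq_true_eq, pvWalk_de, pvWalk_gni, pvWalk_noit, pvWalk_ssen, pvWalk, pvChild, pvRule, Char.reduceEq, reduceIte, reduceCtorEq, ne_eq]
                  try split_ifs <;> first | rfl | omega | (exfalso; omega)
            · have hb0 : (('o' == c2) = false) := by simp [Ne.symm h2]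
              simp only [h2, hb0, List.reverse_cons, List.reverse_nil, List.nil_append, List.cons_append, List.isPrefixOf, List.length_cons, Char.reduceBEq, beq_self_eq_true, Bool.and_false, Bool.false_and, Bool.true_and, Bool.and_true, Bool.not_true, Bool.not_false, Bool.false_eq_true, not_true, if_false, if_true, decide_eq_true_eq, pvWalk_de, pvWalk_gni, pvWalk_noit, pvWalk_ssen, pvWalk, pvChild, pvRule, Char.reduceEq, reduceIte, reduceCtorEq, ne_eq]
              try split_ifs <;> first | rfl | omega | (exfalso; omega)
        · by_cases h1s : c1 = 's'
          · subst h1s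
            rcases r1 with _ | ⟨c2, r2⟩
            · simp only [List.reverse_cons, List.reverse_nil, List.nil_append, List.cons_append, List.isPrefixOf, List.length_cons, Char.reduceBEq, beq_self_eq_true, Bool.and_false, Bool.false_and, Bool.true_and, Bool.and_true, Bool.not_true, Bool.not_false, Bool.false_eq_true, not_true, if_false, if_true, decide_eq_true_eq, pvWalk_de, pvWalk_gni, pvWalk_noit, pvWalk_ssen, pvWalk, pvChild, pvRule, Char.reduceEq, reduceIte, reduceCtorEq, ne_eq]
              try split_ifs <;> first | rfl | omega | (exfalso; omega)
            · by_cases h2 : c2 = 's'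
              · subst h2
                rcases r2 with _ | ⟨c3, r3⟩
                · simp only [List.reverse_cons, List.reverse_nil, List.nil_append, List.cons_append, List.isPrefixOf, List.length_cons, Char.reduceBEq, beq_self_eq_true, Bool.and_false, Bool.false_and, Bool.true_and, Bool.and_true, Bool.not_true, Bool.not_false, Bool.false_eq_true, not_true, if_false, if_true, decide_eq_true_eq, pvWalk_de, pvWalk_gni, pvWalk_noit, pvWalk_ssen, pvWalk, pvChild, pvRule, Char.reduceEq, reduceIte, reduceCtorEq, ne_eq]
                  try split_ifs <;> first | rfl | omega | (exfalso; omega)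
                · by_cases h3 : c3 = 'e'
                  · subst h3
                    rcases r3 with _ | ⟨c4, r4⟩
                    · simp only [List.reverse_cons, List.reverse_nil, List.nil_append, List.cons_append, List.isPrefixOf, List.length_cons, Char.reduceBEq, beq_self_eq_true, Bool.and_false, Bool.false_and, Bool.true_and, Bool.and_true, Bool.not_true, Bool.not_false, Bool.false_eq_true, not_true, if_false, if_true, decide_eq_true_eq, pvWalk_de, pvWalk_gni, pvWalk_noit, pvWalk_ssen, pvWalk, pvChild, pvRule, Char.reduceEq, reduceIte, reduceCtorEq, ne_eq]
                      try split_ifs <;> first | rfl | omega | (exfalso; omega)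
                    · by_cases h4 : c4 = 'n'
                      · subst h4
                        simp only [List.reverse_cons, List.reverse_nil, List.nil_append, List.cons_append, List.isPrefixOf, List.length_cons, Char.reduceBEq, beq_self_eq_true, Bool.and_false, Bool.false_and, Bool.true_and, Bool.and_true, Bool.not_true, Bool.not_false, Bool.false_eq_true, not_true, if_false, if_true, decide_eq_true_eq, pvWalk_de, pvWalk_gni, pvWalk_noit, pvWalk_ssen, pvWalk, pvChild, pvRule, Char.reduceEq, reduceIte, reduceCtorEq, ne_eq]
                        try split_ifs <;> first | rfl | omega | (exfalso; omega)
                      · have hb0 : (('n' == c4) = false) := by simp [Ne.symm h4]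
                        simp only [h4, hb0, List.reverse_cons, List.reverse_nil, List.nil_append, List.cons_append, List.isPrefixOf, List.length_cons, Char.reduceBEq, beq_self_eq_true, Bool.and_false, Bool.false_and, Bool.true_and, Bool.and_true, Bool.not_true, Bool.not_false, Bool.false_eq_true, not_true, if_false, if_true, decide_eq_true_eq, pvWalk_de, pvWalk_gni, pvWalk_noit, pvWalk_ssen, pvWalk, pvChild, pvRule, Char.reduceEq, reduceIte, reduceCtorEq, ne_eq]
                        try split_ifs <;> first | rfl | omega | (exfalso; omega)
                  · have hb0 : (('e' == c3) = false) := by simp [Ne.symm h3]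
                    simp only [h3, hb0, List.reverse_cons, List.reverse_nil, List.nil_append, List.cons_append, List.isPrefixOf, List.length_cons, Char.reduceBEq, beq_self_eq_true, Bool.and_false, Bool.false_and, Bool.true_and, Bool.and_true, Bool.not_true, Bool.not_false, Bool.false_eq_true, not_true, if_false, if_true, decide_eq_true_eq, pvWalk_de, pvWalk_gni, pvWalk_noit, pvWalk_ssen, pvWalk, pvChild, pvRule, Char.reduceEq, reduceIte, reduceCtorEq, ne_eq]
                    try split_ifs <;> first | rfl | omega | (exfalso; omega)
              · have hb0 : (('s' == c2) = false) := by simp [Ne.symm h2]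
                simp only [h2, hb0, List.reverse_cons, List.reverse_nil, List.nil_append, List.cons_append, List.isPrefixOf, List.length_cons, Char.reduceBEq, beq_self_eq_true, Bool.and_false, Bool.false_and, Bool.true_and, Bool.and_true, Bool.not_true, Bool.not_false, Bool.false_eq_true, not_true, if_false, if_true, decide_eq_true_eq, pvWalk_de, pvWalk_gni, pvWalk_noit, pvWalk_ssen, pvWalk, pvChild, pvRule, Char.reduceEq, reduceIte, reduceCtorEq, ne_eq]
                try split_ifs <;> first | rfl | omega | (exfalso; omega)
          · have hb0 : (('d' == c1) = false) := by simp [Ne.symm h1]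
            have hb1 : (('g' == c1) = false) := by simp [Ne.symm h1g]
            have hb2 : (('n' == c1) = false) := by simp [Ne.symm h1n]
            have hb3 : (('s' == c1) = false) := by simp [Ne.symm h1s]
            simp only [h1, h1g, h1n, h1s, hb0, hb1, hb2, hb3, List.reverse_cons, List.reverse_nil, List.nil_append, List.cons_append, List.isPrefixOf, List.length_cons, Char.reduceBEq, beq_self_eq_true, Bool.and_false, Bool.false_and, Bool.true_and, Bool.and_true, Bool.not_true, Bool.not_false, Bool.false_eq_true, not_true, if_false, if_true, decide_eq_true_eq, pvWalk_de, pvWalk_gni, pvWalk_noit, pvWalk_ssen, pvWalk, pvChild, pvRule, Char.reduceEq, reduceIte, reduceCtorEq, ne_eq]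
            try split_ifs <;> first | rfl | omega | (exfalso; omega)

-- ===== VERDICT =====
theorem stem_text_spec : Claim_equal_stem_text := by
  intro text _
  unfold Spec_stem_text stem_text stem_text_alt
  simp only [PySem.List.foldl_append_singleton_eq_map, List.nil_append]
  refine congrArg (PySem.Str.join " ") (List.map_congr_left (fun w _ => ?_))
  have h := pvStemChars_eq w.toList.reverse
  rw [List.reverse_reverse] at h
  exact congrArg String.ofList h
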